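-- pv_equiv track=rewrite | github.com/dirkbaechle/pyvctrl | pyvctrl/__init__.py | parseOutputWithoutErrors
-- ===== SOURCE A (Python) =====
-- MKEY = 1
--
-- def reduceFloatValue(m):
--     """ Seems to be an int/float value, so get rid of the
--         appended unit in the string.
--     """
--     sl = m.split()
--     if len(sl) == 2:
--         value = sl[0]
--     else:
--         value = m
--
--     # Also reduce trailing zeros
--     while value.endswith('00'):
--         value = value[:-1]
--
--     return value
--
-- def parseOutputWithoutErrors(ml):
--     """ Parses the given vclient output, while assuming that no
--         errors occured. This means that this function assumes that
--         there will only be key and value lines, and that on each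
--         key line a value will follow.
--     """
--     data = {}
--     mode = MKEY
--     key = None
--     value = None
--
--     for m in ml:
--         # Simplify string to one space only between tokens
--         m = ' '.join(m.split())
--
--         # Is this line supposed to be a key or a value?
--         if mode == MKEY:
--             # A key
--             key = m.rstrip(':')
--         else:
--             # A value
--             if '.' in m:
--                 value = reduceFloatValue(m)
--             else:
--                 value = m
--             data[key] = value
--
--         # Toggle parsing mode
--         mode = 1 - mode
--
--     return data
-- ===== SOURCE B (Python) =====
-- def reduceFloatValue(m):
--     """ Strip an appended unit, then collapse a run of 2+ trailing
--         zeros to a single zero (closed form for A's while-loop).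
--     """
--     sl = m.split()
--     value = sl[0] if len(sl) == 2 else m
--     stripped = value.rstrip('0')
--     if len(value) - len(stripped) >= 2:
--         value = stripped + '0'
--     return value
--
--
-- def parseOutputWithoutErrors(ml):
--     """ Staged passes: normalize all lines, slice them into the key
--         and value columns, then build the dict from the zipped pairs.
--     """
--     lines = [' '.join(m.split()) for m in ml]
--     keys = [k.rstrip(':') for k in lines[0::2]]
--     vals = [reduceFloatValue(v) if '.' in v else v for v in lines[1::2]]
--     return dict(zip(keys, vals))
-- ===== Notes on version B (the rewrite author's own statement) =====
-- stated objective: alternative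
-- what changed: Replaces A's single stateful loop (mode toggle, carried key, while-loop zero stripping) by staged passes: normalize every line, slice into the key column and the value column, process each column, and build the dict from the zipped pairs; the trailing-zero while-loop becomes a closed-form rstrip('0') computation.
import Mathlib
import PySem

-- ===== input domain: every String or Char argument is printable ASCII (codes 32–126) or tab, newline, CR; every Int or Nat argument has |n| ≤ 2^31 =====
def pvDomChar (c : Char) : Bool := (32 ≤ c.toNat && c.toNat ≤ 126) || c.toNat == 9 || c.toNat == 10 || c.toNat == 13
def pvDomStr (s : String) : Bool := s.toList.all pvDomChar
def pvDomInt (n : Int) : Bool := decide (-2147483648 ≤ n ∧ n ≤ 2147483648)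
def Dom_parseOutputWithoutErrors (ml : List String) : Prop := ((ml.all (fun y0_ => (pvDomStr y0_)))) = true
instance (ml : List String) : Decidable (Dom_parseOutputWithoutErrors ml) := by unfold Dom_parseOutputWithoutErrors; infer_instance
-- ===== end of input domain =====

-- B replaces A's stateful mode-toggling loop by staged passes (normalize all lines, slice into the
-- key and value columns, zip) and A's trailing-zero while-loop by a closed-form rstrip('0') computation
-- (objective: alternative decomposition, same cost).

-- ===== PORT A =====
-- ' '.join(m.split())
def pvNorm (m : String) : String := PySem.Str.join " " (PySem.Str.split₀ m)

-- m.rstrip(':') — ported by hand: drop every trailing ':' (exact: rstrip(chars) removes all trailing chars of the set)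
def pvRstripColon (s : String) : String :=
  String.ofList ((s.toList.reverse.dropWhile (fun c => c == ':')).reverse)

-- the while-loop of A's reduceFloatValue: while value.endswith('00'): value = value[:-1]
-- (value[:-1] on a string that ends with "00" is dropLast — exact)
def pvReduceZeros (cs : List Char) : List Char :=
  if h : PySem.Chars.endswith cs ['0', '0'] then pvReduceZeros cs.dropLast else cs
termination_by cs.length
decreasing_by
  have hne : cs ≠ [] := by
    intro hnil; rw [hnil] at h; simp [PySem.Chars.endswith] at h
  have h1 : cs.dropLast.length = cs.length - 1 := List.length_dropLast
  have h2 : 0 < cs.length := List.length_pos_iff.mpr hne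
  omega

def reduceFloatValue (m : String) : String :=
  let sl := PySem.Str.split₀ m
  let value := if sl.length = 2 then sl.headD "" else m
  String.ofList (pvReduceZeros value.toList)

-- the loop body of A (state: data, mode, key)
def pvStepA (st : PySem.Dict String String × Int × String) (m0 : String) :
    PySem.Dict String String × Int × String :=
  let data := st.1
  let mode := st.2.1
  let key := st.2.2
  let m := pvNorm m0
  if mode = 1 then
    (data, 1 - mode, pvRstripColon m)
  else
    let value := if PySem.Str.isIn "." m then reduceFloatValue m else m
    (data.insert key value, 1 - mode, key)

-- key starts as Python's None; it is never read before the first key line sets it, so "" is a faithful placeholder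
def parseOutputWithoutErrors (ml : List String) : List (String × String) :=
  (ml.foldl pvStepA (PySem.Dict.empty, 1, "")).1.items

-- ===== PORT B =====
-- B's reduceFloatValue: unit stripped the same way, then the run of 2+ trailing zeros is
-- collapsed to one zero in closed form via value.rstrip('0') (ported by hand as
-- reverse/dropWhile/reverse — exact: drops all trailing '0')
def reduceFloatValue_alt (m : String) : String :=
  let sl := PySem.Str.split₀ m
  let value := if sl.length = 2 then sl.headD "" else m
  let stripped := String.ofList ((value.toList.reverse.dropWhile (fun c => c == '0')).reverse)
  if 2 ≤ PySem.Str.len value - PySem.Str.len stripped then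
    String.ofList (stripped.toList ++ ['0'])
  else value

def pvValFn (v : String) : String :=
  if PySem.Str.isIn "." v then reduceFloatValue_alt v else v

-- lines[0::2] — slice with step 2, ported by hand: elements 0, 2, 4, … (exact)
def pvEvery2 {α : Type} : List α → List α
  | [] => []
  | [x] => [x]
  | x :: _ :: rest => x :: pvEvery2 rest

def parseOutputWithoutErrors_alt (ml : List String) : List (String × String) :=
  let lines := ml.map pvNorm                                -- pass 1: normalize every line
  let keys := (pvEvery2 lines).map pvRstripColon            -- pass 2: key column  lines[0::2]
  let vals := (pvEvery2 lines.tail).map pvValFn             -- pass 3: value column lines[1::2]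
  ((keys.zip vals).foldl (fun d kv => d.insert kv.1 kv.2) PySem.Dict.empty).items  -- dict(zip(keys, vals))

-- ===== PRECONDITION & SPEC =====
def Spec_parseOutputWithoutErrors (ml : List String) (out : List (String × String)) : Prop := out = parseOutputWithoutErrors_alt ml
instance (ml : List String) (out : List (String × String)) : Decidable (Spec_parseOutputWithoutErrors ml out) := by unfold Spec_parseOutputWithoutErrors; infer_instance

-- ===== CLAIM (what is proved, stated in full; the proofs are below) =====
def Claim_equal_parseOutputWithoutErrors : Prop := ∀ (ml : List String), Dom_parseOutputWithoutErrors ml → Spec_parseOutputWithoutErrors ml (parseOutputWithoutErrors ml)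

-- ===== LEMMAS AND PROOFS =====
theorem pvEndsIff (rs : List Char) :
    PySem.Chars.endswith rs.reverse ['0', '0'] = true ↔ ['0', '0'] <+: rs := by
  rw [PySem.Chars.endswith_iff]
  simpa using (List.reverse_suffix (l₁ := ['0', '0']) (l₂ := rs))

-- pvReduceZeros on the reversed list, in closed form
theorem pvRevReduce : ∀ (rs : List Char),
    pvReduceZeros rs.reverse =
      if 2 ≤ rs.length - (rs.dropWhile (fun c => c == '0')).length then
        (rs.dropWhile (fun c => c == '0')).reverse ++ ['0']
      else rs.reverse
  | [] => by rw [pvReduceZeros]; simp [PySem.Chars.endswith]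
  | c :: t => by
    by_cases h2 : ['0', '0'] <+: c :: t
    · obtain ⟨hc, h1⟩ := List.cons_prefix_cons.mp h2
      obtain ⟨b, u, rfl⟩ : ∃ b u, t = b :: u := by
        cases t with
        | nil => simp at h1
        | cons b u => exact ⟨b, u, rfl⟩
      obtain ⟨hb, -⟩ := List.cons_prefix_cons.mp h1
      subst hc; subst hb
      rw [pvReduceZeros, dif_pos ((pvEndsIff _).mpr h2)]
      have hdl : ('0' :: '0' :: u).reverse.dropLast = ('0' :: u).reverse := by simp
      rw [hdl, pvRevReduce ('0' :: u)]
      have hlen : ((('0' :: u).dropWhile (fun c => c == '0'))).length ≤ u.length := by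
        simpa using List.length_dropWhile_le (fun c => (c == '0')) u
      have hdw : (('0' :: '0' :: u).dropWhile (fun c => c == '0')) =
          (('0' :: u).dropWhile (fun c => c == '0')) := by simp
      rw [hdw]
      by_cases hcond : 2 ≤ ('0' :: u).length - (('0' :: u).dropWhile (fun c => c == '0')).length
      · rw [if_pos hcond, if_pos (by simp at hcond ⊢; omega)]
      · rw [if_neg hcond, if_pos (by simp at hlen ⊢; omega)]
        -- here the run is exactly one '0': u has no leading zeros, so dropWhile u = u
        have hu : u.dropWhile (fun c => c == '0') = u := by
          apply List.IsSuffix.eq_of_length (List.dropWhile_suffix _)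
          have hle := List.length_dropWhile_le (fun c => (c == '0')) u
          simp at hcond
          omega
        simp [hu]
    · rw [pvReduceZeros, dif_neg (fun hh => h2 ((pvEndsIff _).mp hh))]
      rw [if_neg ?_]
      by_cases hc : c = '0'
      · subst hc
        have ht : t.dropWhile (fun c => c == '0') = t := by
          cases t with
          | nil => rfl
          | cons b u =>
            have hb : ¬ b = '0' := fun hb => h2 (List.cons_prefix_cons.mpr
              ⟨rfl, List.cons_prefix_cons.mpr ⟨hb.symm, List.nil_prefix⟩⟩)
            simp [hb]
        simp [ht]
      · simp [hc]

theorem reduceCore (V : String) :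
    String.ofList (pvReduceZeros V.toList) =
      (let stripped := String.ofList ((V.toList.reverse.dropWhile (fun c => c == '0')).reverse);
       if 2 ≤ PySem.Str.len V - PySem.Str.len stripped then
         String.ofList (stripped.toList ++ ['0'])
       else V) := by
  have h := pvRevReduce V.toList.reverse
  rw [List.reverse_reverse] at h
  rw [h]
  simp only [List.length_reverse, PySem.Str.len_eq, String.toList_ofList,
    apply_ite String.ofList, String.ofList_toList]
  -- align the Nat-side and Int-side (Python len) forms of the same condition
  have hle := List.length_dropWhile_le (fun c => (c == '0')) V.toList.reverse
  simp only [List.length_reverse] at hle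
  by_cases hc : 2 ≤ V.toList.length - (List.dropWhile (fun c => c == '0') V.toList.reverse).length
  · rw [if_pos hc, if_pos (by omega)]
  · rw [if_neg hc, if_neg (by omega)]

theorem reduceEq (m : String) : reduceFloatValue m = reduceFloatValue_alt m := by
  unfold reduceFloatValue reduceFloatValue_alt
  exact reduceCore _

theorem pvEvery2_cons {α : Type} (x : α) (l : List α) :
    pvEvery2 (x :: l) = x :: pvEvery2 l.tail := by
  cases l <;> rfl

theorem pvLoopEq : ∀ (ml : List String) (d : PySem.Dict String String) (key0 : String),
    (ml.foldl pvStepA (d, (1 : Int), key0)).1 =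
      (((pvEvery2 (ml.map pvNorm)).map pvRstripColon).zip
        ((pvEvery2 (ml.map pvNorm).tail).map pvValFn)).foldl
        (fun d kv => d.insert kv.1 kv.2) d
  | [], _, _ => rfl
  | [k], d, key0 => by
    simp [List.foldl, pvStepA, pvEvery2]
  | k :: v :: rest, d, key0 => by
    show ((rest.foldl pvStepA (pvStepA (pvStepA (d, 1, key0) k) v))).1 = _
    have h1 : pvStepA (d, (1 : Int), key0) k = (d, 0, pvRstripColon (pvNorm k)) := by
      simp [pvStepA]
    rw [h1]
    have h2 : pvStepA (d, (0 : Int), pvRstripColon (pvNorm k)) v =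
        (d.insert (pvRstripColon (pvNorm k)) (pvValFn (pvNorm v)), 1, pvRstripColon (pvNorm k)) := by
      simp [pvStepA, pvValFn, reduceEq]
      rfl
    rw [h2, pvLoopEq rest]
    simp [pvEvery2_cons]

-- ===== VERDICT (by name: the statement is the Claim_ definition above) =====
theorem parseOutputWithoutErrors_spec : Claim_equal_parseOutputWithoutErrors := by
  intro ml _
  unfold Spec_parseOutputWithoutErrors parseOutputWithoutErrors parseOutputWithoutErrors_alt
  rw [pvLoopEq]
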